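-- pv_equiv track=rewrite | github.com/BeautySea/company_scrapping | test.py | qb
-- ===== SOURCE A (Python) =====
-- def qb(t):
--     e = ""
--     for n in range(len(t)):
--         if '0' <= t[n] <= '9':
--             r = ord(t[n]) - ord('0')
--             r = (r + 5) % 10
--             e += chr(r + ord('0'))
--         else:
--             e += t[n].lower() if t[n].isupper() else t[n].upper()
--     return e
-- ===== SOURCE B (Python) =====
-- def qb(t):
--     table = {}
--     for c in t:
--         if '0' <= c <= '9':
--             table[ord(c)] = chr((ord(c) - 48 + 5) % 10 + 48)
--         elif c.isupper():
--             table[ord(c)] = c.lower()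
--         else:
--             table[ord(c)] = c.upper()
--     return t.translate(table)
-- ===== Notes on version B (the rewrite author's own statement) =====
-- stated objective: idiomatic
-- what changed: Replaced the per-index loop with repeated string concatenation by building a translation table (dict keyed by ord(c)) once and applying it in a single str.translate pass.
import Mathlib
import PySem

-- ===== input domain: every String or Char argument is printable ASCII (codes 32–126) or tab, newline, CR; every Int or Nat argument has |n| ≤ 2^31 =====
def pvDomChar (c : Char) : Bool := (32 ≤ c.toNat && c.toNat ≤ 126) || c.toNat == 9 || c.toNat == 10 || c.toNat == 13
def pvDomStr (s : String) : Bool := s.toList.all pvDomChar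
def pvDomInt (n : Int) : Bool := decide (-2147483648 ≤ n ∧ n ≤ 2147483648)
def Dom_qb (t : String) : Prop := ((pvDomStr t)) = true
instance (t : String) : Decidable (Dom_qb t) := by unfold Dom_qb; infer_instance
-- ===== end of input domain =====

-- B replaces A's per-index loop with string concatenation by a precomputed per-character
-- translation table (dict keyed by ord(c)) applied in one str.translate pass (objective: idiomatic).

-- ===== PORT A =====
-- A: for n in range(len(t)): rotate digits by +5 mod 10, otherwise swap the case; e += each piece.
def qb (t : String) : String :=
  String.ofList
    ((PySem.List.pyRange 0 (PySem.Str.len t) 1).foldl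
      (fun e n =>
        let c := PySem.List.pyGetD t.toList n ' '   -- t[n]; n ∈ range(len(t)) is always in range
        if '0' ≤ c ∧ c ≤ '9' then
          let r : Int := (c.toNat : Int) - ('0'.toNat : Int)
          let r2 : Int := PySem.Int.mod (r + 5) 10
          e ++ [Char.ofNat (r2 + ('0'.toNat : Int)).toNat]
        else
          e ++ [if PySem.Chars.isupper c then PySem.Chars.lowerChar c else PySem.Chars.upperChar c])
      [])

-- ===== PORT B =====
-- value stored in the translation table for character c (a 1-char string, as in the Python dict)
def qbTrans (c : Char) : String :=
  if '0' ≤ c ∧ c ≤ '9' then String.ofList [Char.ofNat ((c.toNat - 48 + 5) % 10 + 48)]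
  else if PySem.Chars.isupper c then String.ofList [PySem.Chars.lowerChar c]
  else String.ofList [PySem.Chars.upperChar c]

-- B: build table = {ord(c): qbTrans c for c in t}, then t.translate(table)
-- (translate maps each char c to table.get(ord(c), c), joined into one string)
def qb_alt (t : String) : String :=
  let table : PySem.Dict Int String :=
    t.toList.foldl (fun d c => d.insert ((c.toNat : Int)) (qbTrans c)) PySem.Dict.empty
  PySem.Str.join "" (t.toList.map (fun c => table.getD ((c.toNat : Int)) (String.ofList [c])))

-- ===== PRECONDITION & SPEC =====
def Spec_qb (t : String) (out : String) : Prop := out = qb_alt t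
instance (t : String) (out : String) : Decidable (Spec_qb t out) := by unfold Spec_qb; infer_instance

-- ===== CLAIM (what is proved, stated in full; the proofs are below) =====
def Claim_equal_qb : Prop := ∀ (t : String), Dom_qb t → Spec_qb t (qb t)

-- ===== LEMMAS AND PROOFS =====

-- the common per-character transformation both programs compute
def pvChar (c : Char) : Char :=
  if '0' ≤ c ∧ c ≤ '9' then Char.ofNat ((c.toNat - 48 + 5) % 10 + 48)
  else if PySem.Chars.isupper c then PySem.Chars.lowerChar c
  else PySem.Chars.upperChar c

theorem pv_le_char_iff (c : Char) : ('0' ≤ c) ↔ 48 ≤ c.toNat := by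
  rw [Char.le_def, UInt32.le_iff_toNat_le]; exact Iff.rfl

-- A's digit arithmetic (Int, via PySem.Int.mod) produces pvChar's Nat arithmetic result
theorem pv_digit_char (c : Char) (h0 : '0' ≤ c) :
    Char.ofNat (PySem.Int.mod (((c.toNat : Int) - ('0'.toNat : Int)) + 5) 10 + ('0'.toNat : Int)).toNat
      = Char.ofNat ((c.toNat - 48 + 5) % 10 + 48) := by
  have h48 : 48 ≤ c.toNat := (pv_le_char_iff c).mp h0
  rw [PySem.Int.mod_eq_emod_of_pos (by norm_num)]
  congr 1
  have : ('0'.toNat : Int) = 48 := by decide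
  rw [this]
  omega

theorem pv_A_toList (t : String) : (qb t).toList = t.toList.map pvChar := by
  have hfun : (fun (e : List Char) (n : Int) =>
        let c := PySem.List.pyGetD t.toList n ' '
        if '0' ≤ c ∧ c ≤ '9' then
          let r : Int := (c.toNat : Int) - ('0'.toNat : Int)
          let r2 : Int := PySem.Int.mod (r + 5) 10
          e ++ [Char.ofNat (r2 + ('0'.toNat : Int)).toNat]
        else
          e ++ [if PySem.Chars.isupper c then PySem.Chars.lowerChar c else PySem.Chars.upperChar c])
      = fun e n => e ++ [pvChar (PySem.List.pyGetD t.toList n ' ')] := by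
    funext e n
    simp only [pvChar]
    split
    · next h => rw [pv_digit_char _ h.1]
    · rfl
  show (String.ofList _).toList = _
  rw [hfun, PySem.List.foldl_append_singleton_eq_map, List.nil_append]
  have : (fun n => pvChar (PySem.List.pyGetD t.toList n ' '))
      = pvChar ∘ (fun n => PySem.List.pyGetD t.toList n ' ') := rfl
  rw [this, ← List.map_map]
  have hlen : PySem.Str.len t = PySem.List.len t.toList := by
    simp [PySem.Str.len_eq, PySem.List.len_eq]
  rw [hlen, PySem.List.map_pyGetD_pyRange_zero]
  simp

-- lookups at a key no element of xs writes to are unchanged by the table-building fold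
theorem pv_table_keeps (xs : List Char) (d : PySem.Dict Int String) (k : Int) (dflt : String)
    (h : ∀ y ∈ xs, (y.toNat : Int) ≠ k) :
    (xs.foldl (fun d c => d.insert ((c.toNat : Int)) (qbTrans c)) d).getD k dflt = d.getD k dflt := by
  induction xs generalizing d with
  | nil => rfl
  | cons x xs ih =>
    rw [List.foldl_cons, ih _ (fun y hy => h y (List.mem_cons_of_mem _ hy)),
      PySem.Dict.getD_insert, if_neg (h x List.mem_cons_self).symm]

-- the finished table answers qbTrans c at key ord(c) for every c occurring in the string
theorem pv_table_getD (xs : List Char) (d : PySem.Dict Int String) (c : Char) (dflt : String)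
    (hc : c ∈ xs) :
    (xs.foldl (fun d c => d.insert ((c.toNat : Int)) (qbTrans c)) d).getD ((c.toNat : Int)) dflt
      = qbTrans c := by
  induction xs generalizing d with
  | nil => cases hc
  | cons x xs ih =>
    by_cases h : c ∈ xs
    · rw [List.foldl_cons, ih _ h]
    · have hcx : c = x := by
        rcases List.mem_cons.mp hc with h' | h'
        · exact h'
        · exact absurd h' h
      subst hcx
      rw [List.foldl_cons, pv_table_keeps]
      · rw [PySem.Dict.getD_insert, if_pos rfl]
      · intro y hy hk
        have hn : y.toNat = c.toNat := by exact_mod_cast hk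
        have : y = c := Char.ext (UInt32.toNat_inj.mp hn)
        exact h (this ▸ hy)

theorem pv_qbTrans_toList (c : Char) : (qbTrans c).toList = [pvChar c] := by
  unfold qbTrans pvChar
  by_cases h : '0' ≤ c ∧ c ≤ '9'
  · simp [h]
  · by_cases h2 : PySem.Chars.isupper c <;> simp [h, h2]

theorem pv_B_toList (t : String) : (qb_alt t).toList = t.toList.map pvChar := by
  have hbridge : ∀ (parts : List String),
      (PySem.Str.join "" parts).toList = PySem.Chars.join [] (parts.map String.toList) := by
    intro parts; simp [PySem.Str.join]
  show (PySem.Str.join "" (t.toList.map (fun c =>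
      PySem.Dict.getD
        (t.toList.foldl (fun d c => d.insert ((c.toNat : Int)) (qbTrans c)) PySem.Dict.empty)
        ((c.toNat : Int)) (String.ofList [c])))).toList = _
  rw [hbridge, List.map_map]
  have hmap : t.toList.map (String.toList ∘ fun c =>
      PySem.Dict.getD
        (t.toList.foldl (fun d c => d.insert ((c.toNat : Int)) (qbTrans c)) PySem.Dict.empty)
        ((c.toNat : Int)) (String.ofList [c]))
      = t.toList.map (fun c => [pvChar c]) := by
    apply List.map_congr_left
    intro c hc
    simp only [Function.comp_apply]
    rw [pv_table_getD _ _ _ _ hc, pv_qbTrans_toList]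
  rw [hmap]
  have h1 : t.toList.map (fun c => [pvChar c]) = (t.toList.map pvChar).map (fun c => [c]) := by
    rw [List.map_map]; rfl
  rw [h1]
  exact PySem.Chars.join_nil_singletons _

-- ===== VERDICT (by name: the statement is the Claim_ definition above) =====
theorem qb_spec : Claim_equal_qb := by
  intro t _
  show qb t = qb_alt t
  exact String.toList_inj.mp ((pv_A_toList t).trans (pv_B_toList t).symm)
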